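-- pv_equiv track=rewrite | github.com/gr3enarr0w/ml1-final-code | src/main.py | _clean_chapter_text
-- ===== SOURCE A (Python) =====
-- def _clean_chapter_text(text: str) -> str:
--     text = text.strip()
--     # Remove accidental spillover headings from some generations.
--     stop_markers = ["Chapter 2", "Chapter 3", "Chapter 4", "Chapter 5"]
--     for marker in stop_markers:
--         idx = text.find(marker)
--         if idx > 0:
--             text = text[:idx].strip()
--     return text
-- ===== SOURCE B (Python) =====
-- def _clean_chapter_text(text: str) -> str:
--     text = text.strip()
--     # Gather all spillover-heading positions in one pass and cut once at the earliest.
--     markers = ["Chapter 2", "Chapter 3", "Chapter 4", "Chapter 5"]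
--     positive = [i for i in (text.find(m) for m in markers) if i > 0]
--     if positive:
--         text = text[:min(positive)].strip()
--     return text
-- ===== Notes on version B (the rewrite author's own statement) =====
-- stated objective: alternative
-- what changed: A repeatedly re-searches the progressively truncated text, shrinking it once per marker in sequence; B searches the full stripped text once per marker, takes the minimum positive index, and truncates a single time.
import Mathlib
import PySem

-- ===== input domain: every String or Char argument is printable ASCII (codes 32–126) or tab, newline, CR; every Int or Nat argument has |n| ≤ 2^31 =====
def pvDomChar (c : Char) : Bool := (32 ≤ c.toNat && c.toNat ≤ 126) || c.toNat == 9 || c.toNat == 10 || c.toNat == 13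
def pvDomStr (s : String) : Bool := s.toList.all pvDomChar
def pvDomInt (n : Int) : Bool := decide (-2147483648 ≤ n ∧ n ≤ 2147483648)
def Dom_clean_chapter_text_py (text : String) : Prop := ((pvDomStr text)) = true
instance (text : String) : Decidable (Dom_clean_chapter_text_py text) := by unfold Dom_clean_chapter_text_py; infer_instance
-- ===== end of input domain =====

-- B replaces A's repeated search-and-shrink loop by one index-gathering pass plus a single
-- minimum-based truncation (alternative decomposition, same asymptotic cost).

-- ===== PORT A =====
def clean_chapter_text_py (text : String) : String :=
  let text1 := PySem.Str.strip text
  (["Chapter 2", "Chapter 3", "Chapter 4", "Chapter 5"]).foldl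
    (fun t marker =>
      let idx := PySem.Str.find t marker
      if idx > 0 then PySem.Str.strip (PySem.Str.slice t none (some idx)) else t)
    text1

-- ===== PORT B =====
def clean_chapter_text_py_alt (text : String) : String :=
  let s := PySem.Str.strip text
  let positive := ((["Chapter 2", "Chapter 3", "Chapter 4", "Chapter 5"]).map
      (fun m => PySem.Str.find s m)).filter (fun i => i > 0)
  match PySem.List.min? positive (fun i => i) with
  | some i => PySem.Str.strip (PySem.Str.slice s none (some i))
  | none => s

-- ===== PRECONDITION & SPEC =====
def Spec_clean_chapter_text_py (text : String) (out : String) : Prop := out = clean_chapter_text_py_alt text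
instance (text : String) (out : String) : Decidable (Spec_clean_chapter_text_py text out) := by unfold Spec_clean_chapter_text_py; infer_instance

-- ===== CLAIM (what is proved, stated in full; the proofs are below) =====
def Claim_equal_clean_chapter_text_py : Prop := ∀ (text : String), Dom_clean_chapter_text_py text → Spec_clean_chapter_text_py text (clean_chapter_text_py text)

-- ===== LEMMAS AND PROOFS =====

-- The four stop markers, at the character-list level.
def pvMarkers : List (List Char) :=
  [['C','h','a','p','t','e','r',' ','2'], ['C','h','a','p','t','e','r',' ','3'],
   ['C','h','a','p','t','e','r',' ','4'], ['C','h','a','p','t','e','r',' ','5']]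

-- A's loop step, at the character-list level.
def pvStep (t m : List Char) : List Char :=
  if 0 < PySem.Chars.find t m then
    PySem.Chars.strip (t.take (PySem.Chars.find t m).toNat)
  else t

-- Minimum positive find among the markers of P, as B computes it.
def pvMinPos (s : List Char) (P : List (List Char)) : Option Int :=
  PySem.List.min? ((P.map (fun m => PySem.Chars.find s m)).filter (fun i => i > 0)) (fun i => i)

-- rstrip is a prefix, and what it removes is all whitespace.
lemma pvRstrip_prefix (u : List Char) : PySem.Chars.rstrip u <+: u := by
  have h := List.dropWhile_suffix (l := u.reverse) PySem.Chars.isspace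
  have h2 := (List.reverse_prefix (l₁ := u.reverse.dropWhile PySem.Chars.isspace)
    (l₂ := u.reverse)).mpr h
  simpa [PySem.Chars.rstrip] using h2

lemma pvRstrip_append (u : List Char) :
    ∃ w, u = PySem.Chars.rstrip u ++ w ∧ ∀ c ∈ w, PySem.Chars.isspace c := by
  refine ⟨(u.reverse.takeWhile PySem.Chars.isspace).reverse, ?_, ?_⟩
  · conv_lhs => rw [← u.reverse_reverse,
      ← List.takeWhile_append_dropWhile (p := PySem.Chars.isspace) (l := u.reverse)]
    rw [List.reverse_append]
    rfl
  · intro c hc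
    exact List.mem_takeWhile_imp (by simpa using hc)

lemma pvLstrip_prefix_fix {u v : List Char} (h : u <+: v)
    (hv : PySem.Chars.lstrip v = v) : PySem.Chars.lstrip u = u := by
  cases u with
  | nil => rfl
  | cons a u' =>
    rcases h with ⟨t, ht⟩
    have hpa : PySem.Chars.isspace a = false := by
      by_contra hx
      have hpa' : PySem.Chars.isspace a = true := by simpa using hx
      rw [← ht] at hv
      simp only [PySem.Chars.lstrip, List.cons_append, List.dropWhile_cons, hpa',
        if_true] at hv
      have hlen := List.length_dropWhile_le (p := PySem.Chars.isspace) (l := u' ++ t)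
      rw [hv] at hlen
      simp at hlen
    simp only [PySem.Chars.lstrip, List.dropWhile_cons, hpa]
    simp

lemma pvLstrip_strip (l : List Char) :
    PySem.Chars.lstrip (PySem.Chars.strip l) = PySem.Chars.strip l := by
  have h1 : PySem.Chars.strip l <+: PySem.Chars.lstrip l := pvRstrip_prefix _
  have h2 : PySem.Chars.lstrip (PySem.Chars.lstrip l) = PySem.Chars.lstrip l := by
    simp only [PySem.Chars.lstrip]
    exact List.dropWhile_idempotent PySem.Chars.isspace l
  exact pvLstrip_prefix_fix h1 h2

lemma pvStrip_take {s : List Char} (hs : PySem.Chars.lstrip s = s) (k : ℕ) :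
    PySem.Chars.strip (s.take k) = PySem.Chars.rstrip (s.take k) := by
  have h : PySem.Chars.lstrip (s.take k) = s.take k :=
    pvLstrip_prefix_fix (List.take_prefix k s) hs
  simp [PySem.Chars.strip, h]

-- occurrence transfer through take
lemma pvOcc_take {m : List Char} (hm : m ≠ []) (s : List Char) (c j : ℕ) :
    m <+: (s.take c).drop j ↔ (m <+: s.drop j ∧ j + m.length ≤ c) := by
  rw [List.drop_take, List.prefix_take_iff]
  constructor
  · rintro ⟨h1, h2⟩
    refine ⟨h1, ?_⟩
    by_cases hj : j ≤ c
    · omega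
    · have hlen : m.length = 0 := by omega
      rw [List.length_eq_zero_iff] at hlen
      exact absurd hlen hm
  · rintro ⟨h1, h2⟩
    exact ⟨h1, by omega⟩

-- occurrence transfer through rstrip (marker ends in non-whitespace)
lemma pvOcc_rstrip {m : List Char} (hm : m ≠ [])
    (hlast : PySem.Chars.isspace (m.getLast hm) = false) (u : List Char) (j : ℕ) :
    m <+: (PySem.Chars.rstrip u).drop j ↔ m <+: u.drop j := by
  constructor
  · intro h
    exact h.trans ((pvRstrip_prefix u).drop j)
  · intro h
    obtain ⟨w, hw, hws⟩ := pvRstrip_append u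
    have hmlen : 0 < m.length := List.length_pos_iff.mpr hm
    have hjlen : j + m.length ≤ u.length := by
      have hle := h.length_le
      rw [List.length_drop] at hle
      by_cases hj : j ≤ u.length
      · omega
      · rw [List.drop_eq_nil_of_le (by omega)] at h
        rw [List.prefix_nil] at h
        exact absurd h hm
    have hple : j + m.length ≤ (PySem.Chars.rstrip u).length := by
      by_contra hgt
      rw [not_le] at hgt
      have hidx : m.length - 1 < m.length := by omega
      have hu1 : u[j + (m.length - 1)]? = some (m.getLast hm) := by
        obtain ⟨r, hr⟩ := h
        have hdp : (u.drop j)[m.length - 1]? = u[j + (m.length - 1)]? :=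
          List.getElem?_drop
        rw [← hr, List.getElem?_append_left (by omega)] at hdp
        rw [← hdp, List.getElem?_eq_getElem hidx, List.getLast_eq_getElem]
      have hge : (PySem.Chars.rstrip u).length ≤ j + (m.length - 1) := by omega
      rw [hw, List.getElem?_append_right hge] at hu1
      have hmem := List.mem_of_getElem? hu1
      have := hws _ hmem
      rw [hlast] at this
      exact absurd this (by simp)
    have hr : PySem.Chars.rstrip u = u.take (PySem.Chars.rstrip u).length :=
      List.prefix_iff_eq_take.mp (pvRstrip_prefix u)
    rw [hr]
    rw [pvOcc_take hm]
    exact ⟨h, hple⟩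

-- find = j from an occurrence at j and none earlier
lemma pvFind_eq_of {l m : List Char} {j : ℕ} (hocc : m <+: l.drop j)
    (hmin : ∀ i < j, ¬ m <+: l.drop i) : PySem.Chars.find l m = (j : Int) := by
  have hins : 0 ≤ PySem.Chars.find l m := by
    rw [PySem.Chars.find_nonneg_iff, ← PySem.Chars.isIn_iff_infix,
      ← PySem.Chars.exists_prefix_drop_iff_isIn]
    exact ⟨j, hocc⟩
  obtain ⟨h1, h2⟩ := PySem.Chars.find_spec hins
  have hle1 : (PySem.Chars.find l m).toNat ≤ j := by
    by_contra hlt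
    exact h2 j (by omega) hocc
  have hle2 : j ≤ (PySem.Chars.find l m).toNat := by
    by_contra hlt
    exact hmin _ (by omega) h1
  omega

lemma pvFind_none_iff (l m : List Char) :
    PySem.Chars.find l m = -1 ↔ ∀ j : ℕ, ¬ m <+: l.drop j := by
  rw [PySem.Chars.find_eq_neg_one_iff, ← PySem.Chars.isIn_iff_infix,
    ← PySem.Chars.exists_prefix_drop_iff_isIn]
  exact not_exists

-- find in the rstripped c-prefix, from find in the whole string
lemma pvFind_cut (s : List Char) {m : List Char} (hm : m ≠ [])
    (hlast : PySem.Chars.isspace (m.getLast hm) = false) (c : ℕ) :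
    PySem.Chars.find (PySem.Chars.rstrip (s.take c)) m =
      if 0 ≤ PySem.Chars.find s m ∧ PySem.Chars.find s m + m.length ≤ (c : Int) then
        PySem.Chars.find s m
      else -1 := by
  have hiff : ∀ j : ℕ, (m <+: (PySem.Chars.rstrip (s.take c)).drop j) ↔
      (m <+: s.drop j ∧ j + m.length ≤ c) := by
    intro j
    rw [pvOcc_rstrip hm hlast, pvOcc_take hm]
  split_ifs with h
  · obtain ⟨h0, hb⟩ := h
    obtain ⟨h1, h2⟩ := PySem.Chars.find_spec h0
    have hres := pvFind_eq_of (l := PySem.Chars.rstrip (s.take c))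
      ((hiff _).mpr ⟨h1, by omega⟩)
      (fun i hi hocc => h2 i hi ((hiff i).mp hocc).1)
    rw [hres, Int.toNat_of_nonneg h0]
  · rw [pvFind_none_iff]
    intro j hocc
    obtain ⟨hjs, hjc⟩ := (hiff j).mp hocc
    rcases (show PySem.Chars.find s m = -1 ∨ 0 ≤ PySem.Chars.find s m by
      have := PySem.Chars.neg_one_le_find s m; omega) with hf | hf
    · exact (pvFind_none_iff s m).mp hf j hjs
    · obtain ⟨h1, h2⟩ := PySem.Chars.find_spec hf
      have hjge : (PySem.Chars.find s m).toNat ≤ j := by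
        by_contra hx
        exact h2 j (by omega) hjs
      have hcc : ¬ (PySem.Chars.find s m + (m.length : Int) ≤ (c : Int)) :=
        fun hx => h ⟨hf, hx⟩
      omega

lemma pvMarker_ne {m : List Char} (hm : m ∈ pvMarkers) : m ≠ [] := by
  simp only [pvMarkers, List.mem_cons, List.not_mem_nil, or_false] at hm
  rcases hm with rfl | rfl | rfl | rfl <;> simp

lemma pvMarker_len {m : List Char} (hm : m ∈ pvMarkers) : m.length = 9 := by
  simp only [pvMarkers, List.mem_cons, List.not_mem_nil, or_false] at hm
  rcases hm with rfl | rfl | rfl | rfl <;> rfl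

lemma pvMarker_last {m : List Char} (hm : m ∈ pvMarkers) :
    PySem.Chars.isspace (m.getLast (pvMarker_ne hm)) = false := by
  have hm2 := hm
  simp only [pvMarkers, List.mem_cons, List.not_mem_nil, or_false] at hm2
  rcases hm2 with rfl | rfl | rfl | rfl <;> rfl

lemma pvMarker_C {m : List Char} (hm : m ∈ pvMarkers) : m[0]? = some 'C' := by
  simp only [pvMarkers, List.mem_cons, List.not_mem_nil, or_false] at hm
  rcases hm with rfl | rfl | rfl | rfl <;> rfl

lemma pvMarker_no_C {m : List Char} (hm : m ∈ pvMarkers) {d : ℕ} (h1 : 1 ≤ d)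
    (h2 : d ≤ 8) : m[d]? ≠ some 'C' := by
  simp only [pvMarkers, List.mem_cons, List.not_mem_nil, or_false] at hm
  interval_cases d <;> rcases hm with rfl | rfl | rfl | rfl <;> decide

-- two different markers cannot overlap
lemma pvMarkers_apart {s m m' : List Char} (hm : m ∈ pvMarkers) (hm' : m' ∈ pvMarkers)
    {a b : ℕ} (ha : m <+: s.drop a) (hb : m' <+: s.drop b) (hab : a < b) : a + 9 ≤ b := by
  by_contra hcon
  rw [not_le] at hcon
  have hlm : m.length = 9 := pvMarker_len hm
  obtain ⟨ta, hta⟩ := ha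
  obtain ⟨tb, htb⟩ := hb
  have e1 : m[b - a]? = s[b]? := by
    have h1 : (s.drop a)[b - a]? = s[a + (b - a)]? := List.getElem?_drop
    rw [← hta, List.getElem?_append_left (by omega)] at h1
    rw [h1]
    congr 1
    omega
  have e2 : m'[0]? = s[b]? := by
    have h1 : (s.drop b)[0]? = s[b + 0]? := List.getElem?_drop
    rw [← htb, List.getElem?_append_left (by
      have := List.length_pos_iff.mpr (pvMarker_ne hm')
      omega)] at h1
    rw [h1]
    congr 1
  have heq : m[b - a]? = m'[0]? := e1.trans e2.symm
  rw [pvMarker_C hm'] at heq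
  exact pvMarker_no_C hm (by omega) (by omega) heq

lemma pvMarkers_ne_same {s m m' : List Char} (hm : m ∈ pvMarkers) (hm' : m' ∈ pvMarkers)
    {a : ℕ} (ha : m <+: s.drop a) (hb : m' <+: s.drop a) : m = m' := by
  have hlen : m.length = m'.length := by rw [pvMarker_len hm, pvMarker_len hm']
  rcases List.prefix_or_prefix_of_prefix ha hb with h | h
  · exact h.eq_of_length hlen
  · exact (h.eq_of_length hlen.symm).symm

lemma pvMin?_append_none {l : List Int} (y : Int)
    (h : PySem.List.min? l (fun i => i) = none) :
    PySem.List.min? (l ++ [y]) (fun i => i) = some y := by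
  simp only [PySem.List.min?] at h ⊢
  rw [List.foldl_append, h]
  rfl

lemma pvMin?_append_some {l : List Int} (y : Int) {m : Int}
    (h : PySem.List.min? l (fun i => i) = some m) :
    PySem.List.min? (l ++ [y]) (fun i => i) = some (if y < m then y else m) := by
  simp only [PySem.List.min?] at h ⊢
  rw [List.foldl_append, h]
  simp only [List.foldl]
  split_ifs <;> rfl

lemma pvMin?_mem (l : List Int) : ∀ x : Int,
    PySem.List.min? l (fun i => i) = some x → x ∈ l := by
  induction l using List.reverseRecOn with
  | nil => intro x h; simp [PySem.List.min?] at h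
  | append_singleton l' y ih =>
    intro x h
    rcases hm : PySem.List.min? l' (fun i => i) with _ | mval
    · rw [pvMin?_append_none y hm] at h
      injection h with h
      subst h
      simp
    · rw [pvMin?_append_some y hm] at h
      injection h with h
      by_cases hy : y < mval
      · rw [if_pos hy] at h; subst h; simp
      · rw [if_neg hy] at h; subst h
        exact List.mem_append_left _ (ih _ hm)

lemma pvMinPos_attained {s : List Char} {P : List (List Char)} {c : Int}
    (h : pvMinPos s P = some c) : 0 < c ∧ ∃ m' ∈ P, PySem.Chars.find s m' = c := by
  have hx := pvMin?_mem _ _ h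
  rw [List.mem_filter] at hx
  obtain ⟨hmem, hpos⟩ := hx
  refine ⟨by simpa using hpos, ?_⟩
  rw [List.mem_map] at hmem
  obtain ⟨m', hm', he⟩ := hmem
  exact ⟨m', hm', he⟩

-- appending one marker to the scanned set, at the level of pvMinPos
lemma pvMinPos_append_notpos {s : List Char} (P : List (List Char)) {m : List Char}
    (hf : ¬ 0 < PySem.Chars.find s m) :
    pvMinPos s (P ++ [m]) = pvMinPos s P := by
  unfold pvMinPos
  rw [List.map_append, List.filter_append]
  simp [hf]

lemma pvMinPos_append_pos_none {s : List Char} {P : List (List Char)} {m : List Char}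
    (hf : 0 < PySem.Chars.find s m) (h : pvMinPos s P = none) :
    pvMinPos s (P ++ [m]) = some (PySem.Chars.find s m) := by
  unfold pvMinPos at h ⊢
  rw [List.map_append, List.filter_append]
  simp only [List.map_cons, List.map_nil]
  have hfil : List.filter (fun i => decide (i > 0)) [PySem.Chars.find s m]
      = [PySem.Chars.find s m] := by
    simp [hf]
  rw [hfil]
  exact pvMin?_append_none _ h

lemma pvMinPos_append_pos_some {s : List Char} {P : List (List Char)} {m : List Char} {c : Int}
    (hf : 0 < PySem.Chars.find s m) (h : pvMinPos s P = some c) :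
    pvMinPos s (P ++ [m]) = some (if PySem.Chars.find s m < c then PySem.Chars.find s m else c) := by
  unfold pvMinPos at h ⊢
  rw [List.map_append, List.filter_append]
  simp only [List.map_cons, List.map_nil]
  have hfil : List.filter (fun i => decide (i > 0)) [PySem.Chars.find s m]
      = [PySem.Chars.find s m] := by
    simp [hf]
  rw [hfil]
  exact pvMin?_append_some _ h

-- the main invariant: A's fold over any subset P of the markers cuts at B's minimum
lemma pvFold_eq (s : List Char) (hs : PySem.Chars.lstrip s = s) :
    ∀ P : List (List Char), (∀ m ∈ P, m ∈ pvMarkers) → P.Nodup →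
    P.foldl pvStep s =
      (match pvMinPos s P with
       | some c => PySem.Chars.rstrip (s.take c.toNat)
       | none => s) := by
  intro P
  induction P using List.reverseRecOn with
  | nil => intro _ _; rfl
  | append_singleton P m ih =>
    intro hP hnd
    have hPm : ∀ x ∈ P, x ∈ pvMarkers := fun x hx => hP x (List.mem_append_left _ hx)
    have hm : m ∈ pvMarkers := hP m (by simp)
    have hmP : m ∉ P := by
      rw [List.nodup_append] at hnd
      intro hx
      exact hnd.2.2 m hx m (by simp) rfl
    have hndP : P.Nodup := (List.nodup_append.mp hnd).1
    rw [List.foldl_append, ih hPm hndP]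
    have hmne := pvMarker_ne hm
    have hmlen := pvMarker_len hm
    have hmlast := pvMarker_last hm
    cases hmp : pvMinPos s P with
    | none =>
      simp only [List.foldl]
      unfold pvStep
      by_cases hf : 0 < PySem.Chars.find s m
      · rw [if_pos hf, pvMinPos_append_pos_none hf hmp]
        exact pvStrip_take hs _
      · rw [if_neg hf, pvMinPos_append_notpos P hf, hmp]
    | some c =>
      obtain ⟨hc0, m', hm'P, hm'f⟩ := pvMinPos_attained hmp
      have hm'M := hPm m' hm'P
      have hm'ne : m' ≠ m := fun he => hmP (he ▸ hm'P)
      have hcast : ((c.toNat : Int)) = c := Int.toNat_of_nonneg (le_of_lt hc0)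
      have hcut := pvFind_cut s hmne hmlast c.toNat
      rw [hcast, hmlen] at hcut
      push_cast at hcut
      simp only [List.foldl]
      unfold pvStep
      rw [hcut]
      by_cases h1 : 0 ≤ PySem.Chars.find s m ∧ PySem.Chars.find s m + 9 ≤ c
      · rw [if_pos h1]
        by_cases hfpos : 0 < PySem.Chars.find s m
        · rw [if_pos hfpos]
          have hTfind : PySem.Chars.find (PySem.Chars.rstrip (s.take c.toNat)) m
              = PySem.Chars.find s m := by
            rw [hcut, if_pos h1]
          have hfleT : PySem.Chars.find s m
              ≤ ((PySem.Chars.rstrip (s.take c.toNat)).length : Int) := by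
            rw [← hTfind]
            exact PySem.Chars.find_le_length _ _
          have hTpre : PySem.Chars.rstrip (s.take c.toNat) <+: s :=
            (pvRstrip_prefix _).trans (List.take_prefix _ _)
          have htake : (PySem.Chars.rstrip (s.take c.toNat)).take
                (PySem.Chars.find s m).toNat = s.take (PySem.Chars.find s m).toNat := by
            conv_lhs => rw [List.prefix_iff_eq_take.mp hTpre]
            rw [List.take_take]
            congr 1
            omega
          rw [htake, pvStrip_take hs,
            pvMinPos_append_pos_some hfpos hmp, if_pos (by omega)]
        · rw [if_neg hfpos, pvMinPos_append_notpos P hfpos, hmp]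
      · rw [if_neg h1, if_neg (by decide : ¬ (0:Int) < -1)]
        by_cases hfpos : 0 < PySem.Chars.find s m
        · have hfc : c < PySem.Chars.find s m := by
            obtain ⟨ho1, _⟩ := PySem.Chars.find_spec (s := s) (sub := m) (le_of_lt hfpos)
            have hm'nonneg : 0 ≤ PySem.Chars.find s m' := by rw [hm'f]; omega
            obtain ⟨ho1', _⟩ := PySem.Chars.find_spec (s := s) (sub := m') hm'nonneg
            rw [hm'f] at ho1'
            rcases lt_trichotomy (PySem.Chars.find s m).toNat c.toNat with hlt | heq | hgt
            · have hap := pvMarkers_apart hm hm'M ho1 ho1' hlt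
              have hcc : ¬ (PySem.Chars.find s m + 9 ≤ c) :=
                fun hx => h1 ⟨le_of_lt hfpos, hx⟩
              omega
            · rw [← heq] at ho1'
              exact absurd (pvMarkers_ne_same hm hm'M ho1 ho1').symm hm'ne
            · omega
          rw [pvMinPos_append_pos_some hfpos hmp, if_neg (by omega)]
        · rw [pvMinPos_append_notpos P hfpos, hmp]

-- lifting the String-level ports to the character level
lemma pvStepS_toList (t m : String) :
    (if PySem.Str.find t m > 0 then
        PySem.Str.strip (PySem.Str.slice t none (some (PySem.Str.find t m)))
      else t).toList = pvStep t.toList m.toList := by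
  unfold pvStep
  rw [PySem.Str.find_eq]
  split_ifs with h
  · rw [PySem.Str.toList_strip, PySem.Str.toList_slice, PySem.Chars.slice_eq_listSlice,
      PySem.List.slice_to _ (le_of_lt h)]
  · rfl

-- ===== VERDICT (by name: the statement is the Claim_ definition above) =====
theorem clean_chapter_text_py_spec : Claim_equal_clean_chapter_text_py := by
  intro text _hdom
  unfold Spec_clean_chapter_text_py
  rw [← String.toList_inj]
  have hA : (clean_chapter_text_py text).toList
      = pvMarkers.foldl pvStep (PySem.Chars.strip text.toList) := by
    unfold clean_chapter_text_py pvMarkers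
    simp only [List.foldl]
    rw [pvStepS_toList, pvStepS_toList, pvStepS_toList, pvStepS_toList,
      PySem.Str.toList_strip]
    rfl
  have hsfix := pvLstrip_strip text.toList
  have hB : (clean_chapter_text_py_alt text).toList =
      (match pvMinPos (PySem.Chars.strip text.toList) pvMarkers with
       | some c => PySem.Chars.rstrip ((PySem.Chars.strip text.toList).take c.toNat)
       | none => PySem.Chars.strip text.toList) := by
    unfold clean_chapter_text_py_alt pvMinPos pvMarkers
    simp only [List.map_cons, List.map_nil, PySem.Str.find_eq, PySem.Str.toList_strip]
    have e2 : "Chapter 2".toList = ['C','h','a','p','t','e','r',' ','2'] := rfl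
    have e3 : "Chapter 3".toList = ['C','h','a','p','t','e','r',' ','3'] := rfl
    have e4 : "Chapter 4".toList = ['C','h','a','p','t','e','r',' ','4'] := rfl
    have e5 : "Chapter 5".toList = ['C','h','a','p','t','e','r',' ','5'] := rfl
    rw [e2, e3, e4, e5]
    cases hmin : PySem.List.min?
        (List.filter (fun i => decide (i > 0))
          [PySem.Chars.find (PySem.Chars.strip text.toList) ['C','h','a','p','t','e','r',' ','2'],
           PySem.Chars.find (PySem.Chars.strip text.toList) ['C','h','a','p','t','e','r',' ','3'],
           PySem.Chars.find (PySem.Chars.strip text.toList) ['C','h','a','p','t','e','r',' ','4'],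
           PySem.Chars.find (PySem.Chars.strip text.toList) ['C','h','a','p','t','e','r',' ','5']])
        (fun i => i) with
    | none =>
      simp [PySem.Str.toList_strip]
    | some i =>
      have hipos : 0 < i := by
        have hmem := pvMin?_mem _ _ hmin
        rw [List.mem_filter] at hmem
        have := hmem.2
        simpa using this
      simp only []
      rw [PySem.Str.toList_strip, PySem.Str.toList_slice, PySem.Chars.slice_eq_listSlice,
        PySem.List.slice_to _ (le_of_lt hipos), PySem.Str.toList_strip]
      exact pvStrip_take hsfix _
  rw [hA, hB]
  exact pvFold_eq _ hsfix pvMarkers (fun _ h => h) (by decide)
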